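-- pv_equiv track=rewrite | github.com/Pyk017/Competetive-Programming | Virtusa_Test_Questions/Placement_Season_Begin.py | psc_ahead
-- ===== SOURCE A (Python) =====
-- def psc_ahead(arr, n):
--     count = 0
--     temp = []
--     temp.append(0)
--     for i in range(1,n):
--         for j in arr[:i]:
--             if j > arr[i]:
--                 count += 1
--         temp.append(count)
--         count = 0
--     return temp
-- ===== SOURCE B (Python) =====
-- def psc_ahead(arr, n):
--     # Maintain the prefix arr[:i] as an incrementally-built sorted list; the
--     # count of earlier elements greater than arr[i] is len(s) minus the first
--     # position whose element exceeds arr[i].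
--     res = [0]
--     s = []
--     for i in range(1, n):
--         x = arr[i]
--         y = arr[i - 1]
--         p = 0
--         while p < len(s) and s[p] <= y:
--             p += 1
--         s.insert(p, y)
--         q = 0
--         while q < len(s) and s[q] <= x:
--             q += 1
--         res.append(len(s) - q)
--     return res
-- ===== Notes on version B (the rewrite author's own statement) =====
-- stated objective: alternative
-- what changed: Instead of rescanning the whole prefix arr[:i] for every i, B maintains the prefix as an incrementally sorted list and reads the count of greater predecessors off the first position whose element exceeds arr[i].
-- outside the precondition, e.g. on psc_ahead([], 3): A returns [0, 0, 0], B raises IndexError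
import Mathlib
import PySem

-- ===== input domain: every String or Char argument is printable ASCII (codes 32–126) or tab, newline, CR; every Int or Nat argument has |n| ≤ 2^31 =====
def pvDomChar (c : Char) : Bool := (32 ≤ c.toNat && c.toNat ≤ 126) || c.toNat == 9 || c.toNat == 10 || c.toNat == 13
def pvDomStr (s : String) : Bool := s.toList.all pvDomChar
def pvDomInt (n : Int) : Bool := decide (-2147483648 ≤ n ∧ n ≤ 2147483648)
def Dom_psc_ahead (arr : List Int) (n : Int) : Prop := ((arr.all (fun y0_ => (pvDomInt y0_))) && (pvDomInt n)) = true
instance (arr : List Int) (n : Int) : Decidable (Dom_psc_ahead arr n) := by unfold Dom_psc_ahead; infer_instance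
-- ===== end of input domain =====

-- B maintains the prefix as an incrementally sorted list instead of rescanning arr[:i] for each i;
-- equivalence is proved on Pre_ (n ≤ len(arr)); same worst-case cost, different algorithm.


-- ===== PORT A =====
def psc_ahead (arr : List Int) (n : Int) : List Int :=
  (PySem.List.pyRange 1 n 1).foldl
    (fun temp i =>
      temp ++ [(PySem.List.slice arr none (some i)).foldl
        (fun count j => if (PySem.List.pyGet? arr i).getD 0 < j then count + 1 else count)
        (0 : Int)])
    [(0 : Int)]

-- ===== PORT B =====
-- the while-loop 'p = 0; while p < len(s) and s[p] <= v: p += 1' of Source B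
def pvScanLE (s : List Int) (v : Int) : Nat :=
  match s with
  | [] => 0
  | a :: t => if a ≤ v then pvScanLE t v + 1 else 0

def psc_ahead_alt (arr : List Int) (n : Int) : List Int :=
  ((PySem.List.pyRange 1 n 1).foldl
    (fun (st : List Int × List Int) i =>
      let x := (PySem.List.pyGet? arr i).getD 0
      let y := (PySem.List.pyGet? arr (i - 1)).getD 0
      let p := pvScanLE st.2 y
      let s' := PySem.List.insert st.2 (p : Int) y
      let q := pvScanLE s' x
      (st.1 ++ [(s'.length : Int) - (q : Int)], s'))
    ([(0 : Int)], [])).1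

-- ===== PRECONDITION & SPEC =====
-- Pre_ excludes n > len(arr): there A raises IndexError on arr[i] for nonempty arr, and for
-- empty arr B's natural indexing of arr[i] raises IndexError while A returns n zeros.
def Pre_psc_ahead (arr : List Int) (n : Int) : Prop := n ≤ (arr.length : Int)
instance (arr : List Int) (n : Int) : Decidable (Pre_psc_ahead arr n) := by unfold Pre_psc_ahead; infer_instance
def pvWitness_psc_ahead : List Int × Int := ([3, 1, 2, 2], 4)

def Spec_psc_ahead (arr : List Int) (n : Int) (out : List Int) : Prop := out = psc_ahead_alt arr n
instance (arr : List Int) (n : Int) (out : List Int) : Decidable (Spec_psc_ahead arr n out) := by unfold Spec_psc_ahead; infer_instance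

-- ===== CLAIM (what is proved, stated in full; the proofs are below) =====
def Claim_equal_psc_ahead : Prop := ∀ (arr : List Int) (n : Int), Dom_psc_ahead arr n → Pre_psc_ahead arr n → Spec_psc_ahead arr n (psc_ahead arr n)

-- ===== LEMMAS AND PROOFS =====

theorem pvScanLE_le (s : List Int) (v : Int) : pvScanLE s v ≤ s.length := by
  induction s with
  | nil => simp [pvScanLE]
  | cons a t ih => simp only [pvScanLE, List.length_cons]; split <;> omega

theorem pvScanLE_sorted (s : List Int) (v : Int) (hs : s.Pairwise (· ≤ ·)) :
    pvScanLE s v = s.countP (fun j => decide (j ≤ v)) := by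
  induction s with
  | nil => simp [pvScanLE]
  | cons a t ih =>
    rcases List.pairwise_cons.mp hs with ⟨ha, ht⟩
    by_cases h : a ≤ v
    · simp [pvScanLE, h, ih ht, Nat.add_comm]
    · have : ∀ j ∈ t, ¬ j ≤ v := fun j hj hle => h (le_trans (ha j hj) hle)
      simp only [pvScanLE, List.countP_cons, if_neg h]
      rw [List.countP_eq_zero.mpr (by intro j hj; simpa using this j hj)]
      simp [h]

theorem pvInsert_perm (s : List Int) (p : Nat) (v : Int) (_hp : p ≤ s.length) :
    (s.take p ++ v :: s.drop p).Perm (v :: s) := by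
  calc (s.take p ++ v :: s.drop p).Perm (v :: (s.take p ++ s.drop p)) := List.perm_middle
    _ = (v :: s) := by rw [List.take_append_drop]

theorem pvInsert_sorted (s : List Int) (v : Int) (hs : s.Pairwise (· ≤ ·)) :
    (s.take (pvScanLE s v) ++ v :: s.drop (pvScanLE s v)).Pairwise (· ≤ ·) := by
  induction s with
  | nil => simp [pvScanLE]
  | cons a t ih =>
    rcases List.pairwise_cons.mp hs with ⟨ha, ht⟩
    by_cases h : a ≤ v
    · simp only [pvScanLE, if_pos h, List.take_succ_cons, List.drop_succ_cons, List.cons_append]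
      refine List.pairwise_cons.mpr ⟨?_, ih ht⟩
      intro b hb
      rcases List.mem_append.mp hb with hb | hb
      · exact ha b (List.mem_of_mem_take hb)
      · rcases List.mem_cons.mp hb with rfl | hb
        · exact h
        · exact ha b (List.mem_of_mem_drop hb)
    · simp only [pvScanLE, if_neg h, List.take_zero, List.drop_zero, List.nil_append]
      refine List.pairwise_cons.mpr ⟨?_, hs⟩
      intro b hb
      rcases List.mem_cons.mp hb with rfl | hb
      · omega
      · exact le_trans (by omega : v ≤ a) (ha b hb)

theorem pvCount_compl (l : List Int) (x : Int) :
    l.countP (fun j => decide (x < j)) + l.countP (fun j => decide (j ≤ x)) = l.length := by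
  have := List.length_eq_countP_add_countP (l := l) (p := fun j => decide (x < j))
  rw [this]
  congr 1
  apply List.countP_congr
  intro j _
  simp [not_lt]

-- step functions of the two ports (proof-local names for the ports' fold bodies)
def pvAstep (arr : List Int) (temp : List Int) (i : Int) : List Int :=
  temp ++ [(PySem.List.slice arr none (some i)).foldl
    (fun count j => if (PySem.List.pyGet? arr i).getD 0 < j then count + 1 else count)
    (0 : Int)]

def pvBstep (arr : List Int) (st : List Int × List Int) (i : Int) : List Int × List Int :=
  let x := (PySem.List.pyGet? arr i).getD 0
  let y := (PySem.List.pyGet? arr (i - 1)).getD 0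
  let p := pvScanLE st.2 y
  let s' := PySem.List.insert st.2 (p : Int) y
  let q := pvScanLE s' x
  (st.1 ++ [(s'.length : Int) - (q : Int)], s')

-- the main loop invariant: after the fold over range(1, k) the two result lists agree and
-- B's auxiliary list is a sorted permutation of arr.take (k-1)
theorem pvMain (arr : List Int) (k : Nat) (hk : k ≤ arr.length) :
    ((PySem.List.pyRange 1 (k : Int) 1).foldl (pvBstep arr) ([(0 : Int)], [])).2.Perm (arr.take (k - 1)) ∧
    ((PySem.List.pyRange 1 (k : Int) 1).foldl (pvBstep arr) ([(0 : Int)], [])).2.Pairwise (· ≤ ·) ∧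
    (PySem.List.pyRange 1 (k : Int) 1).foldl (pvAstep arr) [(0 : Int)] =
      ((PySem.List.pyRange 1 (k : Int) 1).foldl (pvBstep arr) ([(0 : Int)], [])).1 := by
  induction k with
  | zero =>
    rw [PySem.List.pyRange_one_eq_nil (by norm_num)]
    simp
  | succ m ih =>
    by_cases hm : m = 0
    · subst hm
      rw [PySem.List.pyRange_one_eq_nil (by norm_num)]
      simp
    · have hm1 : 1 ≤ m := Nat.one_le_iff_ne_zero.mpr hm
      have hmlt : m < arr.length := by omega
      obtain ⟨hperm, hsort, heq⟩ := ih (by omega)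
      have hcast : ((m + 1 : Nat) : Int) = (m : Int) + 1 := by push_cast; ring
      rw [hcast, PySem.List.pyRange_one_succ_right (by exact_mod_cast hm1),
        List.foldl_append, List.foldl_append, List.foldl_cons, List.foldl_nil,
        List.foldl_cons, List.foldl_nil]
      set S := (PySem.List.pyRange 1 (m : Int) 1).foldl (pvBstep arr) ([(0 : Int)], []) with hS
      -- concrete values read by the step at i = m
      have hylen : m - 1 < arr.length := by omega
      have hy : (PySem.List.pyGet? arr ((m : Int) - 1)).getD 0 = arr[m - 1] := by
        have h1 : ((m : Int) - 1) = ((m - 1 : Nat) : Int) := by omega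
        rw [h1, PySem.List.pyGet?_natCast, List.getElem?_eq_getElem hylen, Option.getD_some]
      have hlenS : S.2.length = m - 1 := by
        have h := hperm.length_eq
        rw [List.length_take] at h
        omega
      set y := arr[m - 1] with hydef
      set p := pvScanLE S.2 y with hpdef
      have hple : p ≤ S.2.length := pvScanLE_le S.2 y
      have hins : PySem.List.insert S.2 (p : Int) y = S.2.take p ++ y :: S.2.drop p :=
        PySem.List.insert_natCast S.2 p y hple
      set s' := S.2.take p ++ y :: S.2.drop p with hs'def
      have hsort' : s'.Pairwise (· ≤ ·) := pvInsert_sorted S.2 y hsort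
      have htakem : arr.take m = arr.take (m - 1) ++ [y] := by
        have h1 : m = (m - 1) + 1 := by omega
        rw [h1, List.take_add_one, List.getElem?_eq_getElem hylen]
        rfl
      have hperm' : s'.Perm (arr.take m) := by
        have h1 : s'.Perm (y :: S.2) := pvInsert_perm S.2 p y hple
        have h2 : (y :: S.2).Perm (S.2 ++ [y]) := List.perm_append_comm (l₁ := [y]) (l₂ := S.2)
        have h3 : (S.2 ++ [y]).Perm (arr.take (m - 1) ++ [y]) := hperm.append_right [y]
        rw [htakem]
        exact (h1.trans h2).trans h3
      have hlens' : s'.length = m := by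
        have := hperm'.length_eq
        rw [List.length_take] at this
        omega
      set x := (PySem.List.pyGet? arr (m : Int)).getD 0 with hxdef
      have hq : pvScanLE s' x = (arr.take m).countP (fun j => decide (j ≤ x)) := by
        rw [pvScanLE_sorted s' x hsort', hperm'.countP_eq]
      have hAval : (PySem.List.slice arr none (some (m : Int))).foldl
          (fun count j => if x < j then count + 1 else count) (0 : Int) =
          ((arr.take m).countP (fun j => decide (x < j)) : Int) := by
        rw [PySem.List.slice_to_natCast, PySem.List.foldl_ite_add_one]
        simp
      have hcount := pvCount_compl (arr.take m) x
      have hlentake : (arr.take m).length = m := by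
        rw [List.length_take]; omega
      refine ⟨?_, ?_, ?_⟩
      · show (pvBstep arr S (m : Int)).2.Perm (arr.take (m + 1 - 1))
        simp only [pvBstep, hy]
        rw [← hpdef, hins]
        simpa using hperm'
      · show (pvBstep arr S (m : Int)).2.Pairwise (· ≤ ·)
        simp only [pvBstep, hy]
        rw [← hpdef, hins]
        exact hsort'
      · show pvAstep arr _ (m : Int) = (pvBstep arr S (m : Int)).1
        simp only [pvAstep, pvBstep, hy, heq]
        congr 1
        rw [hAval, ← hpdef, hins, hq, hlens']
        have hval : ((List.countP (fun j => decide (x < j)) (List.take m arr) : Nat) : Int) =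
            (m : Int) - ((List.countP (fun j => decide (j ≤ x)) (List.take m arr) : Nat) : Int) := by
          omega
        rw [hval]

-- ===== VERDICT (by name: the statement is the Claim_ definition above) =====
theorem psc_ahead_spec : Claim_equal_psc_ahead := by
  intro arr n _ hpre
  have hpre' : n ≤ (arr.length : Int) := hpre
  unfold Spec_psc_ahead psc_ahead psc_ahead_alt
  have hrange : PySem.List.pyRange 1 n 1 = PySem.List.pyRange 1 (n.toNat : Int) 1 := by
    by_cases h : 0 ≤ n
    · rw [Int.toNat_of_nonneg h]
    · rw [PySem.List.pyRange_one_eq_nil (by omega), PySem.List.pyRange_one_eq_nil (by omega)]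
  rw [hrange]
  exact (pvMain arr n.toNat (by omega)).2.2
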